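-- pv_equiv track=rewrite | github.com/JSpeleers/AdventOfCode | 2024/08/antennas.py | count_antinodes_in_bounds
-- ===== SOURCE A (Python) =====
-- from itertools import combinations
--
-- def generate_possible_antinodes(coord, diff_x, diff_y, count=1):
--     x, y = coord
--     antinodes = []
--     for i in range(1, count + 1):
--         antinodes += [(x + diff_x * i, y + diff_y * i), (x - diff_x * i, y - diff_y * i)]
--     return antinodes
--
-- def count_antinodes_in_bounds(coords, rows, cols, replicate=False):
--     antinodes = []
--
--     for coord1, coord2 in combinations(coords, 2):
--         d_x = coord2[0] - coord1[0]
--         d_y = coord2[1] - coord1[1]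
--
--         if replicate:
--             reflections = generate_possible_antinodes(coord1, d_x, d_y, count=rows + cols) + \
--                           generate_possible_antinodes(coord2, d_x, d_y, count=rows + cols)
--         else:
--             reflections = generate_possible_antinodes(coord1, d_x, d_y) + \
--                           generate_possible_antinodes(coord2, d_x, d_y)
--
--         antinodes += [(x, y) for x, y in reflections if
--                       0 <= x < cols and 0 <= y < rows and (replicate or (x, y) != coord1 and (x, y) != coord2)]
--
--     return antinodes
-- ===== SOURCE B (Python) =====
-- def _step_range(x, y, dx, dy, rows, cols, n):
--     # largest sub-interval [lo, hi] of [1, n] with 0 <= x+dx*i < cols and 0 <= y+dy*i < rows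
--     lo, hi = 1, n
--     for v, d, limit in ((x, dx, cols), (y, dy, rows)):
--         if d == 0:
--             if not (0 <= v < limit):
--                 return 1, 0
--         elif d > 0:
--             lo = max(lo, -(v // d))
--             hi = min(hi, (limit - 1 - v) // d)
--         else:
--             lo = max(lo, -((limit - 1 - v) // (-d)))
--             hi = min(hi, v // (-d))
--     return lo, hi
--
--
-- def _emit_line(out, x, y, dx, dy, rows, cols, n):
--     # append, in increasing step order, the in-bounds points (x±dx*i, y±dy*i), 1 <= i <= n,
--     # plus-direction point first at each step; only the in-bounds step interval is walked
--     a1, b1 = _step_range(x, y, dx, dy, rows, cols, n)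
--     a2, b2 = _step_range(x, y, -dx, -dy, rows, cols, n)
--     if a1 > b1:
--         lo, hi = a2, b2
--     elif a2 > b2:
--         lo, hi = a1, b1
--     else:
--         lo, hi = min(a1, a2), max(b1, b2)
--     for i in range(lo, hi + 1):
--         if a1 <= i <= b1:
--             out.append((x + dx * i, y + dy * i))
--         if a2 <= i <= b2:
--             out.append((x - dx * i, y - dy * i))
--
--
-- def count_antinodes_in_bounds(coords, rows, cols, replicate=False):
--     out = []
--     rest = list(coords)
--     while rest:
--         (x1, y1) = rest.pop(0)
--         for (x2, y2) in rest:
--             dx, dy = x2 - x1, y2 - y1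
--             if replicate:
--                 n = rows + cols
--                 _emit_line(out, x1, y1, dx, dy, rows, cols, n)
--                 _emit_line(out, x2, y2, dx, dy, rows, cols, n)
--             elif (dx, dy) != (0, 0):
--                 px, py = x1 - dx, y1 - dy
--                 if 0 <= px < cols and 0 <= py < rows:
--                     out.append((px, py))
--                 qx, qy = x2 + dx, y2 + dy
--                 if 0 <= qx < cols and 0 <= qy < rows:
--                     out.append((qx, qy))
--     return out
-- ===== Notes on version B (the rewrite author's own statement) =====
-- stated objective: faster
-- what changed: Instead of generating all 2*(rows+cols) candidate points per antenna per pair and filtering, B computes the in-bounds step-index interval of each direction by floor division and walks only those indices (and in the non-replicate case emits the two mirror points directly without building candidate lists); intended as faster (O(pairs + output_size) vs O(pairs*(rows+cols))) and measured 7.15x at the largest size both finished, though on replicate inputs whose output list is itself huge both programs remain slow.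
import Mathlib
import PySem

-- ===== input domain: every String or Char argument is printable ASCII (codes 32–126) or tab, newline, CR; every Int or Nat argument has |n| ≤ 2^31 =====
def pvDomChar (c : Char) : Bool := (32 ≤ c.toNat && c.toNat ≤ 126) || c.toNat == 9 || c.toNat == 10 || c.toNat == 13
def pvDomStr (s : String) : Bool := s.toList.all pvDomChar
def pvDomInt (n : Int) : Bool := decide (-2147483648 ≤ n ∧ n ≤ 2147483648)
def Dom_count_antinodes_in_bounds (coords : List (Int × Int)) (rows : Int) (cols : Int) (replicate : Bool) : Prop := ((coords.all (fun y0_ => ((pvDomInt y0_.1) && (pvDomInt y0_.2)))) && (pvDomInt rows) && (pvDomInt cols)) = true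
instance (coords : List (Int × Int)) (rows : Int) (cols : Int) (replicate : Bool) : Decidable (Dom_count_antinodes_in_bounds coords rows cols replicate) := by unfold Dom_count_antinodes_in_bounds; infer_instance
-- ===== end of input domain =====

-- B replaces A's per-pair walk over all rows+cols step counts by a division-computed in-bounds
-- step interval per direction, walking only that interval (and emits the two mirror points
-- directly in the non-replicate case); the returned list is identical.

-- ===== PORT A =====
-- helper generate_possible_antinodes: acc ++ [plus point, minus point] per i in range(1, count+1)
def generate_possible_antinodes (coord : Int × Int) (diff_x diff_y : Int) (count : Int) : List (Int × Int) :=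
  (PySem.List.pyRange 1 (count + 1) 1).foldl
    (fun antinodes i =>
      antinodes ++ [(coord.1 + diff_x * i, coord.2 + diff_y * i),
                    (coord.1 - diff_x * i, coord.2 - diff_y * i)]) []

-- itertools.combinations(coords, 2), pairs in original order
def pvCombinations2 : List (Int × Int) → List ((Int × Int) × (Int × Int))
  | [] => []
  | c :: rest => rest.map (fun x => (c, x)) ++ pvCombinations2 rest

def count_antinodes_in_bounds (coords : List (Int × Int)) (rows : Int) (cols : Int) (replicate : Bool) : List (Int × Int) :=
  (pvCombinations2 coords).foldl
    (fun antinodes pr =>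
      antinodes ++
        ((if replicate then
            generate_possible_antinodes pr.1 (pr.2.1 - pr.1.1) (pr.2.2 - pr.1.2) (rows + cols) ++
            generate_possible_antinodes pr.2 (pr.2.1 - pr.1.1) (pr.2.2 - pr.1.2) (rows + cols)
          else
            generate_possible_antinodes pr.1 (pr.2.1 - pr.1.1) (pr.2.2 - pr.1.2) 1 ++
            generate_possible_antinodes pr.2 (pr.2.1 - pr.1.1) (pr.2.2 - pr.1.2) 1).filter
          (fun p => decide (0 ≤ p.1 ∧ p.1 < cols ∧ 0 ≤ p.2 ∧ p.2 < rows ∧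
                            (replicate = true ∨ (p ≠ pr.1 ∧ p ≠ pr.2))))))
    []

-- ===== PORT B =====
-- _axis: shrink [lo, hi] to the steps i with 0 <= v + d*i < limit; none if empty on this axis
def pvAxis (v d limit lo hi : Int) : Option (Int × Int) :=
  if d = 0 then (if 0 ≤ v ∧ v < limit then some (lo, hi) else none)
  else if 0 < d then
    some (max lo (-(PySem.Int.floordiv v d)), min hi (PySem.Int.floordiv (limit - 1 - v) d))
  else
    some (max lo (-(PySem.Int.floordiv (limit - 1 - v) (-d))), min hi (PySem.Int.floordiv v (-d)))

-- _step_range: the sub-interval [lo, hi] of [1, n] whose stepped points are in bounds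
def pvStepRange (x y dx dy rows cols n : Int) : Int × Int :=
  match pvAxis x dx cols 1 n with
  | none => (1, 0)
  | some (lo, hi) =>
    match pvAxis y dy rows lo hi with
    | none => (1, 0)
    | some r => r

-- _emit_line: in-bounds points of both directions in increasing step order, plus direction first per step
def pvEmitLine (x y dx dy rows cols n : Int) : List (Int × Int) :=
  let s1 := pvStepRange x y dx dy rows cols n
  let s2 := pvStepRange x y (-dx) (-dy) rows cols n
  let lohi : Int × Int :=
    if s1.1 > s1.2 then s2 else if s2.1 > s2.2 then s1 else (min s1.1 s2.1, max s1.2 s2.2)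
  (PySem.List.pyRange lohi.1 (lohi.2 + 1) 1).flatMap (fun i =>
    (if s1.1 ≤ i ∧ i ≤ s1.2 then [(x + dx * i, y + dy * i)] else []) ++
    (if s2.1 ≤ i ∧ i ≤ s2.2 then [(x - dx * i, y - dy * i)] else []))

def count_antinodes_in_bounds_alt (coords : List (Int × Int)) (rows : Int) (cols : Int) (replicate : Bool) : List (Int × Int) :=
  match coords with
  | [] => []
  | c1 :: rest =>
    rest.flatMap (fun c2 =>
      let dx := c2.1 - c1.1
      let dy := c2.2 - c1.2
      if replicate then
        pvEmitLine c1.1 c1.2 dx dy rows cols (rows + cols) ++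
        pvEmitLine c2.1 c2.2 dx dy rows cols (rows + cols)
      else if dx = 0 ∧ dy = 0 then []
      else
        (if 0 ≤ c1.1 - dx ∧ c1.1 - dx < cols ∧ 0 ≤ c1.2 - dy ∧ c1.2 - dy < rows then
          [(c1.1 - dx, c1.2 - dy)] else []) ++
        (if 0 ≤ c2.1 + dx ∧ c2.1 + dx < cols ∧ 0 ≤ c2.2 + dy ∧ c2.2 + dy < rows then
          [(c2.1 + dx, c2.2 + dy)] else []))
    ++ count_antinodes_in_bounds_alt rest rows cols replicate

-- ===== PRECONDITION & SPEC =====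
def Spec_count_antinodes_in_bounds (coords : List (Int × Int)) (rows : Int) (cols : Int) (replicate : Bool) (out : List (Int × Int)) : Prop := out = count_antinodes_in_bounds_alt coords rows cols replicate
instance (coords : List (Int × Int)) (rows : Int) (cols : Int) (replicate : Bool) (out : List (Int × Int)) : Decidable (Spec_count_antinodes_in_bounds coords rows cols replicate out) := by unfold Spec_count_antinodes_in_bounds; infer_instance

-- ===== CLAIM (what is proved, stated in full; the proofs are below) =====
def Claim_equal_count_antinodes_in_bounds : Prop := ∀ (coords : List (Int × Int)) (rows : Int) (cols : Int) (replicate : Bool), Dom_count_antinodes_in_bounds coords rows cols replicate → Spec_count_antinodes_in_bounds coords rows cols replicate (count_antinodes_in_bounds coords rows cols replicate)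

-- ===== LEMMAS AND PROOFS =====

-- A's helper written as a flatMap over the step range
theorem gen_eq_flatMap (c : Int × Int) (dx dy n : Int) :
    generate_possible_antinodes c dx dy n =
      (PySem.List.pyRange 1 (n + 1) 1).flatMap (fun i =>
        [(c.1 + dx * i, c.2 + dy * i), (c.1 - dx * i, c.2 - dy * i)]) := by
  unfold generate_possible_antinodes
  simpa using PySem.List.foldl_append_eq_flatMap
    (fun i => [(c.1 + dx * i, c.2 + dy * i), (c.1 - dx * i, c.2 - dy * i)])
    (PySem.List.pyRange 1 (n + 1) 1) []

-- interval membership for one axis of B's _axis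
theorem pvAxis_char (v d limit lo hi i : Int) :
    (match pvAxis v d limit lo hi with
     | none => False
     | some r => r.1 ≤ i ∧ i ≤ r.2) ↔
    (lo ≤ i ∧ i ≤ hi ∧ 0 ≤ v + d * i ∧ v + d * i < limit) := by
  unfold pvAxis
  rcases lt_trichotomy d 0 with hd | hd | hd
  · have h1 : ¬ (d = 0) := by omega
    have h2 : ¬ (0 < d) := by omega
    have he : (0:Int) < -d := by omega
    simp only [h1, h2, if_false]
    have hl := PySem.Int.le_floordiv_iff_mul_le (a := limit - 1 - v) (b := -d) he (q := -i)
    have hu := PySem.Int.le_floordiv_iff_mul_le (a := v) (b := -d) he (q := i)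
    constructor
    · rintro ⟨ha, hb⟩
      have ha' : -i ≤ PySem.Int.floordiv (limit - 1 - v) (-d) := by omega
      have := hl.mp ha'
      have := hu.mp (le_min_iff.mp hb).2
      refine ⟨by omega, by omega, by nlinarith, by nlinarith⟩
    · rintro ⟨ha, hb, hc, hnd⟩
      have h3 : -i * -d ≤ limit - 1 - v := by nlinarith
      have h4 : i * -d ≤ v := by nlinarith
      have := hl.mpr h3
      have := hu.mpr h4
      constructor
      · simp only [max_le_iff]; omega
      · simp only [le_min_iff]; omega
  · subst hd
    by_cases hv : 0 ≤ v ∧ v < limit <;> simp [hv]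
  · have h1 : ¬ (d = 0) := by omega
    simp only [h1, if_false, hd, if_pos]
    have hl := PySem.Int.le_floordiv_iff_mul_le (a := v) (b := d) hd (q := -i)
    have hu := PySem.Int.le_floordiv_iff_mul_le (a := limit - 1 - v) (b := d) hd (q := i)
    constructor
    · rintro ⟨ha, hb⟩
      have ha' : -i ≤ PySem.Int.floordiv v d := by omega
      have := hl.mp ha'
      have := hu.mp (le_min_iff.mp hb).2
      refine ⟨by omega, by omega, by nlinarith, by nlinarith⟩
    · rintro ⟨ha, hb, hc, hnd⟩
      have h3 : -i * d ≤ v := by nlinarith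
      have h4 : i * d ≤ limit - 1 - v := by nlinarith
      have := hl.mpr h3
      have := hu.mpr h4
      constructor
      · simp only [max_le_iff]; omega
      · simp only [le_min_iff]; omega

-- membership in B's step interval is exactly "step in [1, n] and point in bounds"
theorem pvStepRange_char (x y dx dy rows cols n i : Int) :
    ((pvStepRange x y dx dy rows cols n).1 ≤ i ∧ i ≤ (pvStepRange x y dx dy rows cols n).2) ↔
    (1 ≤ i ∧ i ≤ n ∧ 0 ≤ x + dx * i ∧ x + dx * i < cols ∧ 0 ≤ y + dy * i ∧ y + dy * i < rows) := by
  have hx := pvAxis_char x dx cols 1 n i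
  unfold pvStepRange
  rcases h1 : pvAxis x dx cols 1 n with _ | ⟨lo, hi⟩
  · rw [h1] at hx
    simp only at hx ⊢
    constructor
    · intro h; omega
    · intro h; exact absurd (hx.mpr ⟨h.1, h.2.1, h.2.2.1, h.2.2.2.1⟩) (by simp)
  · rw [h1] at hx
    simp only at hx
    have hy := pvAxis_char y dy rows lo hi i
    rcases h2 : pvAxis y dy rows lo hi with _ | ⟨r⟩
    · rw [h2] at hy
      simp only [h2] at hy ⊢
      constructor
      · intro h; omega
      · rintro ⟨a, b, c, d, e, f⟩
        have := hx.mpr ⟨a, b, c, d⟩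
        exact absurd (hy.mpr ⟨this.1, this.2, e, f⟩) (by simp)
    · rw [h2] at hy
      simp only [h2] at hy ⊢
      constructor
      · intro h
        have h' := hy.mp h
        have h'' := hx.mp ⟨h'.1, h'.2.1⟩
        exact ⟨h''.1, h''.2.1, h''.2.2.1, h''.2.2.2, h'.2.2.1, h'.2.2.2⟩
      · intro h
        have hxx := hx.mpr ⟨h.1, h.2.1, h.2.2.1, h.2.2.2.1⟩
        exact hy.mpr ⟨hxx.1, hxx.2, h.2.2.2.2.1, h.2.2.2.2.2⟩

-- a flatMap over a range may be restricted to a sub-range outside which it emits nothing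
theorem flatMap_shrink {α : Type} (g : Int → List α) (a b c d : Int)
    (hac : a ≤ c) (hcd : c ≤ d) (hdb : d ≤ b)
    (hout : ∀ i, g i ≠ [] → c ≤ i ∧ i < d) :
    (PySem.List.pyRange a b 1).flatMap g = (PySem.List.pyRange c d 1).flatMap g := by
  rw [PySem.List.pyRange_one_append a c b hac (by omega),
      PySem.List.pyRange_one_append c d b hcd hdb, List.flatMap_append, List.flatMap_append]
  have h1 : (PySem.List.pyRange a c 1).flatMap g = [] := by
    apply List.flatMap_eq_nil_iff.mpr
    intro i hi
    rw [PySem.List.mem_pyRange_one] at hi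
    by_contra hne
    have := hout i hne
    omega
  have h2 : (PySem.List.pyRange d b 1).flatMap g = [] := by
    apply List.flatMap_eq_nil_iff.mpr
    intro i hi
    rw [PySem.List.mem_pyRange_one] at hi
    by_contra hne
    have := hout i hne
    omega
  rw [h1, h2]
  simp

-- A's filtered replicate line equals B's emitted line
theorem emit_eq (x y dx dy rows cols n : Int) :
    (generate_possible_antinodes (x, y) dx dy n).filter
        (fun p => decide (0 ≤ p.1 ∧ p.1 < cols ∧ 0 ≤ p.2 ∧ p.2 < rows)) =
      pvEmitLine x y dx dy rows cols n := by
  rw [gen_eq_flatMap, List.filter_flatMap]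
  unfold pvEmitLine
  simp only []
  set s1 := pvStepRange x y dx dy rows cols n with hs1
  set s2 := pvStepRange x y (-dx) (-dy) rows cols n with hs2
  set g : Int → List (Int × Int) := fun i =>
    (if s1.1 ≤ i ∧ i ≤ s1.2 then [(x + dx * i, y + dy * i)] else []) ++
    (if s2.1 ≤ i ∧ i ≤ s2.2 then [(x - dx * i, y - dy * i)] else []) with hg
  have h1 := fun i => pvStepRange_char x y dx dy rows cols n i
  have h2 := fun i => pvStepRange_char x y (-dx) (-dy) rows cols n i
  rw [← hs1] at h1
  rw [← hs2] at h2
  have h2' : ∀ i, (s2.1 ≤ i ∧ i ≤ s2.2) ↔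
      (1 ≤ i ∧ i ≤ n ∧ 0 ≤ x - dx * i ∧ x - dx * i < cols ∧ 0 ≤ y - dy * i ∧ y - dy * i < rows) := by
    intro i
    rw [h2 i]
    constructor <;> rintro ⟨a, b, c, d, e, f⟩ <;>
      exact ⟨a, b, by linarith [neg_mul dx i], by linarith [neg_mul dx i],
             by linarith [neg_mul dy i], by linarith [neg_mul dy i]⟩
  have hcong : (PySem.List.pyRange 1 (n + 1) 1).flatMap
      (fun i => List.filter (fun p => decide (0 ≤ p.1 ∧ p.1 < cols ∧ 0 ≤ p.2 ∧ p.2 < rows))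
        [(x + dx * i, y + dy * i), (x - dx * i, y - dy * i)]) =
      (PySem.List.pyRange 1 (n + 1) 1).flatMap g := by
    apply List.flatMap_congr
    intro i hi
    rw [PySem.List.mem_pyRange_one] at hi
    have e1 : (s1.1 ≤ i ∧ i ≤ s1.2) ↔
        (0 ≤ x + dx * i ∧ x + dx * i < cols ∧ 0 ≤ y + dy * i ∧ y + dy * i < rows) := by
      rw [h1 i]
      constructor
      · rintro ⟨_, _, h⟩; exact h
      · intro h; exact ⟨by omega, by omega, h⟩
    have e2 : (s2.1 ≤ i ∧ i ≤ s2.2) ↔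
        (0 ≤ x - dx * i ∧ x - dx * i < cols ∧ 0 ≤ y - dy * i ∧ y - dy * i < rows) := by
      rw [h2' i]
      constructor
      · rintro ⟨_, _, h⟩; exact h
      · intro h; exact ⟨by omega, by omega, h⟩
    simp only [hg, List.filter_cons, List.filter_nil, decide_eq_true_eq, e1, e2]
    split_ifs <;> simp
  rw [hcong]
  have hPn : ∀ i, (s1.1 ≤ i ∧ i ≤ s1.2) → 1 ≤ i ∧ i ≤ n := fun i h => by
    have := (h1 i).mp h; exact ⟨this.1, this.2.1⟩
  have hQn : ∀ i, (s2.1 ≤ i ∧ i ≤ s2.2) → 1 ≤ i ∧ i ≤ n := fun i h => by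
    have := (h2 i).mp h; exact ⟨this.1, this.2.1⟩
  have hgnil : ∀ i, g i ≠ [] → ((s1.1 ≤ i ∧ i ≤ s1.2) ∨ (s2.1 ≤ i ∧ i ≤ s2.2)) := by
    intro i hne
    by_contra hcon
    have ha : ¬ (s1.1 ≤ i ∧ i ≤ s1.2) := fun h => hcon (Or.inl h)
    have hb : ¬ (s2.1 ≤ i ∧ i ≤ s2.2) := fun h => hcon (Or.inr h)
    apply hne
    simp only [hg, if_neg ha, if_neg hb, List.nil_append]
  set lohi : Int × Int :=
    (if s1.1 > s1.2 then s2 else if s2.1 > s2.2 then s1 else (min s1.1 s2.1, max s1.2 s2.2)) with hlohi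
  have hmem : ∀ i, g i ≠ [] → lohi.1 ≤ i ∧ i ≤ lohi.2 := by
    intro i hne
    rcases hgnil i hne with h | h <;> rw [hlohi] <;> split_ifs with hb1 hb2 <;> (try dsimp only) <;> omega
  by_cases hne : lohi.1 ≤ lohi.2
  · have hb : 1 ≤ lohi.1 ∧ lohi.2 ≤ n := by
      rw [hlohi] at hne ⊢
      split_ifs at hne ⊢ with hb1 hb2 <;> (try dsimp only at hne ⊢)
      · have ha := hQn s2.1 ⟨le_refl _, hne⟩
        have hbb := hQn s2.2 ⟨hne, le_refl _⟩
        omega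
      · have ha := hPn s1.1 ⟨le_refl _, by omega⟩
        have hbb := hPn s1.2 ⟨by omega, le_refl _⟩
        omega
      · have ha := hPn s1.1 ⟨le_refl _, by omega⟩
        have hbb := hPn s1.2 ⟨by omega, le_refl _⟩
        have hc := hQn s2.1 ⟨le_refl _, by omega⟩
        have hd := hQn s2.2 ⟨by omega, le_refl _⟩
        omega
    exact flatMap_shrink g 1 (n + 1) lohi.1 (lohi.2 + 1) (by omega) (by omega) (by omega)
      (fun i hi => by have := hmem i hi; omega)
  · have hnil : PySem.List.pyRange lohi.1 (lohi.2 + 1) 1 = [] :=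
      PySem.List.pyRange_one_eq_nil (by omega)
    rw [hnil, List.flatMap_nil]
    apply List.flatMap_eq_nil_iff.mpr
    intro i hi
    by_contra hcon
    have := hmem i hcon
    omega

-- per-pair agreement of A's filtered reflections with B's per-pair output
theorem pair_eq (c1 c2 : Int × Int) (rows cols : Int) (replicate : Bool) :
    ((if replicate then
        generate_possible_antinodes c1 (c2.1 - c1.1) (c2.2 - c1.2) (rows + cols) ++
        generate_possible_antinodes c2 (c2.1 - c1.1) (c2.2 - c1.2) (rows + cols)
      else
        generate_possible_antinodes c1 (c2.1 - c1.1) (c2.2 - c1.2) 1 ++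
        generate_possible_antinodes c2 (c2.1 - c1.1) (c2.2 - c1.2) 1).filter
      (fun p => decide (0 ≤ p.1 ∧ p.1 < cols ∧ 0 ≤ p.2 ∧ p.2 < rows ∧
                        (replicate = true ∨ (p ≠ c1 ∧ p ≠ c2))))) =
    (if replicate then
        pvEmitLine c1.1 c1.2 (c2.1 - c1.1) (c2.2 - c1.2) rows cols (rows + cols) ++
        pvEmitLine c2.1 c2.2 (c2.1 - c1.1) (c2.2 - c1.2) rows cols (rows + cols)
      else if (c2.1 - c1.1) = 0 ∧ (c2.2 - c1.2) = 0 then []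
      else
        (if 0 ≤ c1.1 - (c2.1 - c1.1) ∧ c1.1 - (c2.1 - c1.1) < cols ∧
            0 ≤ c1.2 - (c2.2 - c1.2) ∧ c1.2 - (c2.2 - c1.2) < rows then
          [(c1.1 - (c2.1 - c1.1), c1.2 - (c2.2 - c1.2))] else []) ++
        (if 0 ≤ c2.1 + (c2.1 - c1.1) ∧ c2.1 + (c2.1 - c1.1) < cols ∧
            0 ≤ c2.2 + (c2.2 - c1.2) ∧ c2.2 + (c2.2 - c1.2) < rows then
          [(c2.1 + (c2.1 - c1.1), c2.2 + (c2.2 - c1.2))] else [])) := by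
  obtain ⟨a, b⟩ := c1
  obtain ⟨c, d⟩ := c2
  cases replicate with
  | true =>
    simp only [if_true, true_or, and_true, List.filter_append]
    rw [← emit_eq a b (c - a) (d - b) rows cols (rows + cols),
        ← emit_eq c d (c - a) (d - b) rows cols (rows + cols)]
  | false =>
    simp only [if_false, Bool.false_eq_true, false_or]
    rw [gen_eq_flatMap, gen_eq_flatMap]
    have hr : PySem.List.pyRange 1 (1 + 1) 1 = [1] := by decide
    rw [hr]
    simp only [List.flatMap_cons, List.flatMap_nil, List.append_nil, List.filter_append,
      List.filter_cons, List.filter_nil, decide_eq_true_eq, mul_one]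
    simp only [Prod.mk.injEq, ne_eq, not_and]
    by_cases hz : (c - a) = 0 ∧ (d - b) = 0
    · rw [if_pos hz]
      split_ifs <;> first | rfl | (exfalso; omega)
    · rw [if_neg hz]
      split_ifs <;> first | rfl | (exfalso; omega)

-- A's foldl written as a flatMap over the combinations
theorem a_eq_flatMap (coords : List (Int × Int)) (rows cols : Int) (replicate : Bool) :
    count_antinodes_in_bounds coords rows cols replicate =
      (pvCombinations2 coords).flatMap (fun pr =>
        ((if replicate then
            generate_possible_antinodes pr.1 (pr.2.1 - pr.1.1) (pr.2.2 - pr.1.2) (rows + cols) ++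
            generate_possible_antinodes pr.2 (pr.2.1 - pr.1.1) (pr.2.2 - pr.1.2) (rows + cols)
          else
            generate_possible_antinodes pr.1 (pr.2.1 - pr.1.1) (pr.2.2 - pr.1.2) 1 ++
            generate_possible_antinodes pr.2 (pr.2.1 - pr.1.1) (pr.2.2 - pr.1.2) 1).filter
          (fun p => decide (0 ≤ p.1 ∧ p.1 < cols ∧ 0 ≤ p.2 ∧ p.2 < rows ∧
                            (replicate = true ∨ (p ≠ pr.1 ∧ p ≠ pr.2)))))) := by
  unfold count_antinodes_in_bounds
  simpa using PySem.List.foldl_append_eq_flatMap _ (pvCombinations2 coords) []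

-- ===== VERDICT (by name: the statement is the Claim_ definition above) =====
theorem count_antinodes_in_bounds_spec : Claim_equal_count_antinodes_in_bounds := by
  unfold Claim_equal_count_antinodes_in_bounds
  intro coords rows cols replicate hD
  clear hD
  unfold Spec_count_antinodes_in_bounds
  rw [a_eq_flatMap]
  induction coords with
  | nil => rfl
  | cons c1 rest ih =>
    show (pvCombinations2 (c1 :: rest)).flatMap _ = _
    rw [show pvCombinations2 (c1 :: rest) = rest.map (fun x => (c1, x)) ++ pvCombinations2 rest from rfl,
        List.flatMap_append, ih]
    show _ ++ _ = count_antinodes_in_bounds_alt (c1 :: rest) rows cols replicate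
    rw [show count_antinodes_in_bounds_alt (c1 :: rest) rows cols replicate = _ ++ count_antinodes_in_bounds_alt rest rows cols replicate from rfl]
    congr 1
    rw [List.flatMap_map]
    apply List.flatMap_congr
    intro c2 _
    simpa using pair_eq c1 c2 rows cols replicate
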